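-- pv_equiv track=rewrite | github.com/sickcell6000/HotWire | scripts/compare_sessions.py | _align_by_name
-- ===== SOURCE A (Python) =====
-- def _align_by_name(a: list[dict], b: list[dict]) -> list[tuple[dict | None, dict | None]]:
--     """Greedy: walk through ``a`` and try to find the next unmatched ``b`` with
--     the same msg_name. Anything left over in either list becomes a lone pair.
--     """
--     pairs: list[tuple[dict | None, dict | None]] = []
--     bi = 0
--     for rec_a in a:
--         name_a = rec_a.get("msg_name")
--         # Find the next b-record with matching msg_name starting at bi.
--         match_j = None
--         for j in range(bi, len(b)):
--             if b[j].get("msg_name") == name_a: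
--                 match_j = j
--                 break
--         if match_j is None:
--             pairs.append((rec_a, None))
--             continue
--         # Everything in b between bi and match_j was skipped — emit as orphans.
--         for j in range(bi, match_j):
--             pairs.append((None, b[j]))
--         pairs.append((rec_a, b[match_j]))
--         bi = match_j + 1
--     # Trailing unmatched b records.
--     for j in range(bi, len(b)):
--         pairs.append((None, b[j]))
--     return pairs
-- ===== SOURCE B (Python) =====
-- def _align_by_name(a: list[dict], b: list[dict]) -> list[tuple[dict | None, dict | None]]:
--     """Same greedy alignment, but the next matching b-index is looked up in a
--     precomputed per-name index list via a monotone cursor instead of re-scanning b."""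
--     idx: dict = {}
--     for j, rb in enumerate(b):
--         idx.setdefault(rb.get("msg_name"), []).append(j)
--     pos: dict = {}
--     pairs: list[tuple[dict | None, dict | None]] = []
--     bi = 0
--     for ra in a:
--         name = ra.get("msg_name")
--         lst = idx.get(name, [])
--         p = pos.get(name, 0)
--         while p < len(lst) and lst[p] < bi:
--             p += 1
--         if p == len(lst):
--             pos[name] = p
--             pairs.append((ra, None))
--         else:
--             h = lst[p]
--             for j in range(bi, h):
--                 pairs.append((None, b[j]))
--             pairs.append((ra, b[h]))
--             pos[name] = p + 1
--             bi = h + 1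
--     for j in range(bi, len(b)):
--         pairs.append((None, b[j]))
--     return pairs
-- ===== Notes on version B (the rewrite author's own statement) =====
-- stated objective: alternative
-- what changed: Replaced the inner linear rescan of b for each a-record by a precomputed per-msg_name index list consulted through a monotone cursor per name (worst-case O(n+m) matching instead of O(n*m), though not measurably faster on the random timing inputs).
import Mathlib
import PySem

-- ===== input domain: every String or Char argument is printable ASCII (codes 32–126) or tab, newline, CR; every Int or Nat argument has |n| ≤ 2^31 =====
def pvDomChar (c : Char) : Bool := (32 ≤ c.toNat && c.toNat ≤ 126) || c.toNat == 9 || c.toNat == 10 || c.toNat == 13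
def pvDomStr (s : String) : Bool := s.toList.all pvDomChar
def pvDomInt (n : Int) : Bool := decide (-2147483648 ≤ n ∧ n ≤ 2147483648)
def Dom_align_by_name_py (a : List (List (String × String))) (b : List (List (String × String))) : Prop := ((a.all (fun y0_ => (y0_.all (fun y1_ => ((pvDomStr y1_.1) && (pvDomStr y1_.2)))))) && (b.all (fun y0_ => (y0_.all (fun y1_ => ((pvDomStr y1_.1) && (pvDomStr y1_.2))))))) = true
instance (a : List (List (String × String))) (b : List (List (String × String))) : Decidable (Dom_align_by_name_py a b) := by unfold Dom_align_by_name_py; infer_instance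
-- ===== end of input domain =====

-- B replaces A's inner rescan of b by precomputed per-msg_name index lists read through a monotone cursor (objective: alternative).

-- shared with both ports: rec.get("msg_name")
def pvGetName (r : List (String × String)) : Option String := (PySem.Dict.mk r).get? "msg_name"

-- shared with both ports: [(None, b[j]) for j in range(bi, hi)]  (the orphan / trailing emission line)
def pvOrphans (b : List (List (String × String))) (bi hi : Int) : List ((Option (List (String × String))) × (Option (List (String × String)))) :=
  (PySem.List.pyRange bi hi 1).map (fun j => (none, some (PySem.List.pyGetD b j [])))

-- ===== PORT A =====
-- inner loop: for j in range(bi, len(b)): if b[j].get("msg_name") == name_a: match_j = j; break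
def pvFindLoop (b : List (List (String × String))) (name : Option String) : List Int → Option Int
  | [] => none
  | j :: rest => if pvGetName (PySem.List.pyGetD b j []) == name then some j else pvFindLoop b name rest

def pvFindFrom (b : List (List (String × String))) (name : Option String) (bi : Int) : Option Int :=
  pvFindLoop b name (PySem.List.pyRange bi (b.length) 1)

def pvStepA (b : List (List (String × String)))
    (st : List ((Option (List (String × String))) × (Option (List (String × String)))) × Int)
    (ra : List (String × String)) :
    List ((Option (List (String × String))) × (Option (List (String × String)))) × Int :=
  match pvFindFrom b (pvGetName ra) st.2 with
  | none => (st.1 ++ [(some ra, none)], st.2)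
  | some mj => (st.1 ++ pvOrphans b st.2 mj ++ [(some ra, some (PySem.List.pyGetD b mj []))], mj + 1)

def align_by_name_py (a : List (List (String × String))) (b : List (List (String × String))) : List ((Option (List (String × String))) × (Option (List (String × String)))) :=
  let fin := a.foldl (pvStepA b) ([], 0)
  fin.1 ++ pvOrphans b fin.2 (b.length)

-- ===== PORT B =====
-- idx.setdefault(rb.get("msg_name"), []).append(j)  ==  d[k] = d.get(k, []) + [j]  (Dict.modify)
def pvBuildIdx (b : List (List (String × String))) : PySem.Dict (Option String) (List Int) :=
  (PySem.List.enumerate b 0).foldl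
    (fun d jr => d.modify (pvGetName jr.2) [] (fun l => l ++ [jr.1])) PySem.Dict.empty

-- while p < len(lst) and lst[p] < bi: p += 1   (cursor positions are list positions, kept as Nat;
-- the fuel argument lst.length - p only bounds the loop, it changes no value)
def pvAdvAux (lst : List Int) (bi : Int) : Nat → Nat → Nat
  | 0, p => p
  | fuel + 1, p => if p < lst.length ∧ lst.getD p 0 < bi then pvAdvAux lst bi fuel (p + 1) else p

def pvAdv (lst : List Int) (bi : Int) (p : Nat) : Nat :=
  pvAdvAux lst bi (lst.length - p) p

def pvStepB (b : List (List (String × String))) (idx : PySem.Dict (Option String) (List Int))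
    (st : List ((Option (List (String × String))) × (Option (List (String × String)))) × Int × PySem.Dict (Option String) Nat)
    (ra : List (String × String)) :
    List ((Option (List (String × String))) × (Option (List (String × String)))) × Int × PySem.Dict (Option String) Nat :=
  let name := pvGetName ra
  let lst := idx.getD name []
  let p := pvAdv lst st.2.1 (st.2.2.getD name 0)
  if p = lst.length then
    (st.1 ++ [(some ra, none)], st.2.1, st.2.2.insert name p)
  else
    let h := lst.getD p 0
    (st.1 ++ pvOrphans b st.2.1 h ++ [(some ra, some (PySem.List.pyGetD b h []))], h + 1, st.2.2.insert name (p + 1))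

def align_by_name_py_alt (a : List (List (String × String))) (b : List (List (String × String))) : List ((Option (List (String × String))) × (Option (List (String × String)))) :=
  let idx := pvBuildIdx b
  let fin := a.foldl (pvStepB b idx) ([], 0, PySem.Dict.empty)
  fin.1 ++ pvOrphans b fin.2.1 (b.length)

-- ===== PRECONDITION & SPEC =====
def Spec_align_by_name_py (a : List (List (String × String))) (b : List (List (String × String))) (out : List ((Option (List (String × String))) × (Option (List (String × String))))) : Prop := out = align_by_name_py_alt a b
instance (a : List (List (String × String))) (b : List (List (String × String))) (out : List ((Option (List (String × String))) × (Option (List (String × String))))) : Decidable (Spec_align_by_name_py a b out) := by unfold Spec_align_by_name_py; infer_instance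

-- ===== CLAIM (what is proved, stated in full; the proofs are below) =====
def Claim_equal_align_by_name_py : Prop := ∀ (a : List (List (String × String))) (b : List (List (String × String))), Dom_align_by_name_py a b → Spec_align_by_name_py a b (align_by_name_py a b)

-- ===== LEMMAS AND PROOFS =====

-- the ordered list of indices of b whose record has msg_name = name
def pvIdxList (b : List (List (String × String))) (name : Option String) : List Int :=
  ((PySem.List.enumerate b 0).filter (fun jr => pvGetName jr.2 == name)).map (·.1)

lemma mem_pvIdxList (b : List (List (String × String))) (name : Option String) (j : Int) :
    j ∈ pvIdxList b name ↔ 0 ≤ j ∧ j < (b.length : Int) ∧ pvGetName (PySem.List.pyGetD b j []) == name := by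
  simp only [pvIdxList, List.mem_map, List.mem_filter, PySem.List.mem_enumerate_iff]
  constructor
  · rintro ⟨p, ⟨⟨k, hk, rfl⟩, hmatch⟩, rfl⟩
    refine ⟨by omega, by push_cast; omega, ?_⟩
    rw [show ((0:Int) + k) = (k:Int) by omega, PySem.List.pyGetD_natCast, List.getD_eq_getElem _ _ hk]
    exact hmatch
  · rintro ⟨h0, hlt, hm⟩
    refine ⟨(j, PySem.List.pyGetD b j []), ⟨⟨j.toNat, by omega, by simp [PySem.List.pyGetD_eq_getElem b [] h0 hlt]; omega⟩, hm⟩, rfl⟩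

lemma pairwise_pvIdxList (b : List (List (String × String))) (name : Option String) :
    (pvIdxList b name).Pairwise (· < ·) := by
  unfold pvIdxList
  rw [List.pairwise_map]
  exact List.Pairwise.filter _ (PySem.List.pairwise_lt_enumerate b 0)

lemma buildIdx_gen (l : List (Int × List (String × String))) :
    ∀ (d : PySem.Dict (Option String) (List Int)) (name : Option String),
    (l.foldl (fun d jr => d.modify (pvGetName jr.2) [] (fun l => l ++ [jr.1])) d).getD name []
      = d.getD name [] ++ (l.filter (fun jr => pvGetName jr.2 == name)).map (·.1) := by
  induction l with
  | nil => simp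
  | cons x t ih =>
    intro d name
    simp only [List.foldl_cons, List.filter_cons]
    by_cases h : pvGetName x.2 = name
    · rw [ih, h, PySem.Dict.getD_modify_self]
      simp
    · rw [ih, PySem.Dict.getD_modify_of_ne _ _ _ (Ne.symm h)]
      simp [h]

lemma buildIdx_getD (b : List (List (String × String))) (name : Option String) :
    (pvBuildIdx b).getD name [] = pvIdxList b name := by
  unfold pvBuildIdx pvIdxList
  rw [buildIdx_gen]
  simp [PySem.Dict.getD, PySem.Dict.empty, PySem.Dict.get?]

lemma find?_sorted_self (L : List Int) (bi : Int) (hs : L.Pairwise (· < ·)) (hm : bi ∈ L) :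
    L.find? (fun j => decide (bi ≤ j)) = some bi := by
  induction L with
  | nil => cases hm
  | cons x t ih =>
    by_cases hx : bi ≤ x
    · have hxb : x = bi := by
        rcases List.mem_cons.mp hm with h | hmt
        · omega
        · have := (List.pairwise_cons.mp hs).1 bi hmt
          omega
      simp [hxb]
    · have hmt : bi ∈ t := by
        rcases List.mem_cons.mp hm with h | h
        · omega
        · exact h
      simpa [List.find?_cons, hx] using ih (List.pairwise_cons.mp hs).2 hmt

lemma find?_shift (L : List Int) (bi : Int) (hm : bi ∉ L) :
    L.find? (fun j => decide (bi ≤ j)) = L.find? (fun j => decide (bi + 1 ≤ j)) := by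
  induction L with
  | nil => rfl
  | cons x t ih =>
    have hx : x ≠ bi := fun h => hm (by simp [h])
    by_cases hle : bi ≤ x
    · rw [List.find?_cons_of_pos (by simp; omega), List.find?_cons_of_pos (by simp; omega)]
    · rw [List.find?_cons_of_neg (by simp; omega), List.find?_cons_of_neg (by simp; omega)]
      exact ih (fun h => hm (List.mem_cons_of_mem _ h))

lemma findFrom_eq (b : List (List (String × String))) (name : Option String) :
    ∀ bi : Int, 0 ≤ bi →
    pvFindFrom b name bi = (pvIdxList b name).find? (fun j => decide (bi ≤ j)) := by
  have main : ∀ (n : Nat) (bi : Int), 0 ≤ bi → ((b.length : Int) - bi).toNat = n →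
      pvFindFrom b name bi = (pvIdxList b name).find? (fun j => decide (bi ≤ j)) := by
    intro n
    induction n with
    | zero =>
      intro bi h0 hn
      have hge : (b.length : Int) ≤ bi := by omega
      rw [pvFindFrom, PySem.List.pyRange_one_eq_nil hge]
      show none = _
      symm
      rw [List.find?_eq_none]
      intro x hx
      have := (mem_pvIdxList b name x).mp hx
      simp only [decide_eq_true_eq]
      omega
    | succ m ih =>
      intro bi h0 hn
      have hlt : bi < (b.length : Int) := by omega
      have hstep : pvFindFrom b name bi =
          if pvGetName (PySem.List.pyGetD b bi []) == name then some bi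
          else pvFindFrom b name (bi + 1) := by
        rw [pvFindFrom, PySem.List.pyRange_one_cons hlt]
        rfl
      by_cases hmatch : (pvGetName (PySem.List.pyGetD b bi []) == name) = true
      · rw [hstep, if_pos hmatch]
        symm
        exact find?_sorted_self _ _ (pairwise_pvIdxList b name)
          ((mem_pvIdxList b name bi).mpr ⟨h0, hlt, hmatch⟩)
      · rw [hstep, if_neg hmatch,
          ih (bi + 1) (by omega) (by omega), ← find?_shift]
        intro hmem
        exact hmatch ((mem_pvIdxList b name bi).mp hmem).2.2
  intro bi h0
  exact main ((b.length : Int) - bi).toNat bi h0 rfl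

lemma pvAdv_spec (lst : List Int) (bi : Int) :
    ∀ p, p ≤ lst.length →
    p ≤ pvAdv lst bi p ∧ pvAdv lst bi p ≤ lst.length ∧
    (∀ k, k < pvAdv lst bi p → k < p ∨ lst.getD k 0 < bi) ∧
    (pvAdv lst bi p < lst.length → bi ≤ lst.getD (pvAdv lst bi p) 0) := by
  have main : ∀ (n : Nat) (p : Nat), lst.length - p = n → p ≤ lst.length →
      p ≤ pvAdvAux lst bi n p ∧ pvAdvAux lst bi n p ≤ lst.length ∧
      (∀ k, k < pvAdvAux lst bi n p → k < p ∨ lst.getD k 0 < bi) ∧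
      (pvAdvAux lst bi n p < lst.length → bi ≤ lst.getD (pvAdvAux lst bi n p) 0) := by
    intro n
    induction n with
    | zero =>
      intro p hn hp
      simp only [pvAdvAux]
      exact ⟨le_refl _, hp, fun k hk => Or.inl hk, fun h => by omega⟩
    | succ m ih =>
      intro p hn hp
      by_cases hc : p < lst.length ∧ lst.getD p 0 < bi
      · rw [pvAdvAux, if_pos hc]
        obtain ⟨h1, h2, h3, h4⟩ := ih (p + 1) (by omega) (by omega)
        refine ⟨by omega, h2, ?_, h4⟩
        intro k hk
        rcases h3 k hk with h | h
        · by_cases hkp : k < p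
          · exact Or.inl hkp
          · have : k = p := by omega
            exact Or.inr (this ▸ hc.2)
        · exact Or.inr h
      · rw [pvAdvAux, if_neg hc]
        refine ⟨le_refl _, hp, fun k hk => Or.inl hk, fun h => ?_⟩
        rcases not_and_or.mp hc with h' | h'
        · omega
        · omega
  intro p hp
  exact main (lst.length - p) p rfl hp

lemma find?_drop_of_fail (pred : Int → Bool) :
    ∀ (L : List Int) (p : Nat), (∀ k, k < p → k < L.length → pred (L.getD k 0) = false) →
    L.find? pred = (L.drop p).find? pred := by
  intro L
  induction L with
  | nil => simp
  | cons x t ih =>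
    intro p hfail
    cases p with
    | zero => simp
    | succ q =>
      have hx : pred x = false := hfail 0 (by omega) (by simp)
      rw [List.drop_succ_cons, List.find?_cons_of_neg (by simp [hx])]
      exact ih q (fun k hk hkl => hfail (k + 1) (by omega) (by simpa using hkl))

-- invariant carried by B's cursor dictionary
def pvInv (b : List (List (String × String))) (pos : PySem.Dict (Option String) Nat) (bi : Int) : Prop :=
  0 ≤ bi ∧ ∀ name, pos.getD name 0 ≤ (pvIdxList b name).length ∧
    ∀ k, k < pos.getD name 0 → (pvIdxList b name).getD k 0 < bi

lemma step_eq (b : List (List (String × String))) (pairs : List ((Option (List (String × String))) × (Option (List (String × String))))) (bi : Int)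
    (pos : PySem.Dict (Option String) Nat) (ra : List (String × String)) (hInv : pvInv b pos bi) :
    (pvStepA b (pairs, bi) ra).1 = (pvStepB b (pvBuildIdx b) (pairs, bi, pos) ra).1 ∧
    (pvStepA b (pairs, bi) ra).2 = (pvStepB b (pvBuildIdx b) (pairs, bi, pos) ra).2.1 ∧
    pvInv b (pvStepB b (pvBuildIdx b) (pairs, bi, pos) ra).2.2 (pvStepB b (pvBuildIdx b) (pairs, bi, pos) ra).2.1 := by
  obtain ⟨hbi, hpos⟩ := hInv
  obtain ⟨hp0, hlt0⟩ := hpos (pvGetName ra)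
  obtain ⟨h1, h2, h3, h4⟩ :=
    pvAdv_spec (pvIdxList b (pvGetName ra)) bi (pos.getD (pvGetName ra) 0) hp0
  have hfail : ∀ k, k < pvAdv (pvIdxList b (pvGetName ra)) bi (pos.getD (pvGetName ra) 0) →
      k < (pvIdxList b (pvGetName ra)).length →
      (fun j => decide (bi ≤ j)) ((pvIdxList b (pvGetName ra)).getD k 0) = false := by
    intro k hk _
    rcases h3 k hk with h | h
    · simpa using not_le.mpr (hlt0 k h)
    · simpa using not_le.mpr h
  have hfind : pvFindFrom b (pvGetName ra) bi =
      ((pvIdxList b (pvGetName ra)).drop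
        (pvAdv (pvIdxList b (pvGetName ra)) bi (pos.getD (pvGetName ra) 0))).find?
        (fun j => decide (bi ≤ j)) := by
    rw [findFrom_eq b (pvGetName ra) bi hbi, find?_drop_of_fail _ _ _ hfail]
  simp only [pvStepA, pvStepB, buildIdx_getD]
  by_cases hple : pvAdv (pvIdxList b (pvGetName ra)) bi (pos.getD (pvGetName ra) 0) =
      (pvIdxList b (pvGetName ra)).length
  · have hnone : pvFindFrom b (pvGetName ra) bi = none := by
      rw [hfind, hple, List.drop_length]
      rfl
    rw [hnone, if_pos hple]
    dsimp only
    refine ⟨rfl, rfl, hbi, fun name' => ?_⟩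
    rw [PySem.Dict.getD_insert]
    by_cases hn : name' = pvGetName ra
    · subst hn
      rw [if_pos rfl]
      refine ⟨h2, fun k hk => ?_⟩
      rcases h3 k hk with h | h
      · exact hlt0 k h
      · exact h
    · rw [if_neg hn]
      exact hpos name'
  · have hplt : pvAdv (pvIdxList b (pvGetName ra)) bi (pos.getD (pvGetName ra) 0) <
        (pvIdxList b (pvGetName ra)).length := by omega
    have hpred : bi ≤ (pvIdxList b (pvGetName ra)).getD
        (pvAdv (pvIdxList b (pvGetName ra)) bi (pos.getD (pvGetName ra) 0)) 0 := h4 hplt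
    have hdrop : (pvIdxList b (pvGetName ra)).drop
        (pvAdv (pvIdxList b (pvGetName ra)) bi (pos.getD (pvGetName ra) 0)) =
        (pvIdxList b (pvGetName ra)).getD
          (pvAdv (pvIdxList b (pvGetName ra)) bi (pos.getD (pvGetName ra) 0)) 0 ::
        (pvIdxList b (pvGetName ra)).drop
          (pvAdv (pvIdxList b (pvGetName ra)) bi (pos.getD (pvGetName ra) 0) + 1) := by
      rw [List.drop_eq_getElem_cons hplt, List.getD_eq_getElem _ _ hplt]
    have hsome : pvFindFrom b (pvGetName ra) bi = some ((pvIdxList b (pvGetName ra)).getD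
        (pvAdv (pvIdxList b (pvGetName ra)) bi (pos.getD (pvGetName ra) 0)) 0) := by
      rw [hfind, hdrop, List.find?_cons_of_pos (by simpa using hpred)]
    have hmemh : (pvIdxList b (pvGetName ra)).getD
        (pvAdv (pvIdxList b (pvGetName ra)) bi (pos.getD (pvGetName ra) 0)) 0 ∈
        pvIdxList b (pvGetName ra) := by
      rw [List.getD_eq_getElem _ _ hplt]
      exact List.getElem_mem hplt
    have hh0 : 0 ≤ (pvIdxList b (pvGetName ra)).getD
        (pvAdv (pvIdxList b (pvGetName ra)) bi (pos.getD (pvGetName ra) 0)) 0 :=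
      ((mem_pvIdxList b (pvGetName ra) _).mp hmemh).1
    rw [hsome, if_neg hple]
    dsimp only
    refine ⟨rfl, rfl, by omega, fun name' => ?_⟩
    rw [PySem.Dict.getD_insert]
    by_cases hn : name' = pvGetName ra
    · subst hn
      rw [if_pos rfl]
      refine ⟨by omega, fun k hk => ?_⟩
      by_cases hkp : k < pvAdv (pvIdxList b (pvGetName ra)) bi (pos.getD (pvGetName ra) 0)
      · rcases h3 k hkp with h | h
        · have := hlt0 k h
          omega
        · omega
      · have : k = pvAdv (pvIdxList b (pvGetName ra)) bi (pos.getD (pvGetName ra) 0) := by omega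
        subst this
        omega
    · rw [if_neg hn]
      obtain ⟨ha, hb'⟩ := hpos name'
      exact ⟨ha, fun k hk => by have := hb' k hk; omega⟩

lemma fold_eq (b : List (List (String × String))) :
    ∀ (a : List (List (String × String))) pairs (bi : Int) (pos : PySem.Dict (Option String) Nat),
    pvInv b pos bi →
    (a.foldl (pvStepA b) (pairs, bi)).1 = (a.foldl (pvStepB b (pvBuildIdx b)) (pairs, bi, pos)).1 ∧
    (a.foldl (pvStepA b) (pairs, bi)).2 = (a.foldl (pvStepB b (pvBuildIdx b)) (pairs, bi, pos)).2.1 := by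
  intro a
  induction a with
  | nil => exact fun pairs bi pos _ => ⟨rfl, rfl⟩
  | cons ra t ih =>
    intro pairs bi pos hInv
    obtain ⟨e1, e2, hInv'⟩ := step_eq b pairs bi pos ra hInv
    simp only [List.foldl_cons]
    have hA : pvStepA b (pairs, bi) ra =
        ((pvStepB b (pvBuildIdx b) (pairs, bi, pos) ra).1,
         (pvStepB b (pvBuildIdx b) (pairs, bi, pos) ra).2.1) := Prod.ext e1 e2
    rw [hA]
    have := ih (pvStepB b (pvBuildIdx b) (pairs, bi, pos) ra).1
      (pvStepB b (pvBuildIdx b) (pairs, bi, pos) ra).2.1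
      (pvStepB b (pvBuildIdx b) (pairs, bi, pos) ra).2.2 hInv'
    simpa using this

-- ===== VERDICT (by name: the statement is the Claim_ definition above) =====
theorem align_by_name_py_spec : Claim_equal_align_by_name_py := by
  intro a b _
  unfold Spec_align_by_name_py align_by_name_py align_by_name_py_alt
  have hInv : pvInv b PySem.Dict.empty 0 := by
    refine ⟨le_refl 0, fun name => ⟨?_, fun k hk => by simp at hk⟩⟩
    · simp [PySem.Dict.getD]
  have h := fold_eq b a [] 0 PySem.Dict.empty hInv
  dsimp only
  rw [h.1, h.2]
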